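-- pv_equiv track=rewrite | github.com/kimheeseo/python | 백준/Bronze/7798. Hotel/Hotel.py | find_cheapest_hotel
-- ===== SOURCE A (Python) =====
-- def find_cheapest_hotel(hotels, team):
--     bed_type, people, max_per_room = team
--     min_cost = float('inf')
--     best_hotel = None
--
--     for hotel in hotels:
--         bed_size, capacity, rooms, cost, name = hotel
--         if (bed_type == 'A' and 20 <= bed_size <= 35) or \
--            (bed_type == 'B' and 36 <= bed_size <= 48) or \
--            (bed_type == 'C' and 49 <= bed_size <= 62):
--             rooms_needed = (people + min(max_per_room, capacity) - 1) // min(max_per_room, capacity)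
--             if rooms_needed <= rooms:
--                 total_cost = rooms_needed * cost
--                 if total_cost < min_cost or (total_cost == min_cost and bed_size > best_hotel[0]):
--                     min_cost = total_cost
--                     best_hotel = (bed_size, total_cost, name)
--
--     return "no-hotel" if best_hotel is None else f"{best_hotel[1]} {best_hotel[2]}"
-- ===== SOURCE B (Python) =====
-- def find_cheapest_hotel(hotels, team):
--     bed_type, people, max_per_room = team
--     ranges = {'A': (20, 35), 'B': (36, 48), 'C': (49, 62)}
--     if bed_type not in ranges:
--         return "no-hotel"
--     lo, hi = ranges[bed_type]
--     cands = []
--     for bed_size, capacity, rooms, cost, name in hotels: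
--         if lo <= bed_size <= hi:
--             per = min(max_per_room, capacity)
--             rooms_needed = (people + per - 1) // per
--             if rooms_needed <= rooms:
--                 cands.append((rooms_needed * cost, bed_size, name))
--     if not cands:
--         return "no-hotel"
--     M = min(c[0] for c in cands)
--     best = max((c for c in cands if c[0] == M), key=lambda c: c[1])
--     return f"{M} {best[2]}"
-- ===== Notes on version B (the rewrite author's own statement) =====
-- stated objective: alternative
-- what changed: B replaces A's single-pass inline min_cost/best_hotel bookkeeping over a lex key by staged passes: a bed-type range table lookup, a candidate-building pass, then M = min of the candidate costs followed by max-by-bed-size among the cost-M candidates.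
import Mathlib
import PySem

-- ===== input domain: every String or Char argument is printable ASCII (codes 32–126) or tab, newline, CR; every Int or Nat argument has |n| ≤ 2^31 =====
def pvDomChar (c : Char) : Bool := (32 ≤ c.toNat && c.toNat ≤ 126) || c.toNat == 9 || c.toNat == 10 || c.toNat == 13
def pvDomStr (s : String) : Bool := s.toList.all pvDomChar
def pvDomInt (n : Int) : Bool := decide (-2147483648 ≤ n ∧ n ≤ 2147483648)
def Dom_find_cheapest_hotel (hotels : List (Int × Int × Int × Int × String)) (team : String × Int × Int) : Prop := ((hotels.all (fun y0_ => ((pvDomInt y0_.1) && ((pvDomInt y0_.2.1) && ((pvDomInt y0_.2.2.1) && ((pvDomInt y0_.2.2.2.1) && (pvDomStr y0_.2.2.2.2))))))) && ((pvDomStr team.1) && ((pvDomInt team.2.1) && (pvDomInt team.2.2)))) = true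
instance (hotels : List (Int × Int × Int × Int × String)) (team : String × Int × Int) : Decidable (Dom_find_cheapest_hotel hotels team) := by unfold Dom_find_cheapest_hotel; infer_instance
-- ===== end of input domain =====

-- B replaces A's single-pass inline best-so-far bookkeeping by staged passes: a range-table
-- lookup for the bed type, a candidate list, then min of costs followed by max-by-bed-size
-- among the minimum-cost candidates (objective: alternative decomposition, same cost).

-- ===== PORT A =====
-- the bed-type range guard, as A writes it
def pvGuardA (bt : String) (bs : Int) : Bool :=
  (bt == "A" && (decide (20 ≤ bs) && decide (bs ≤ 35))) ||
  (bt == "B" && (decide (36 ≤ bs) && decide (bs ≤ 48))) ||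
  (bt == "C" && (decide (49 ≤ bs) && decide (bs ≤ 62)))

-- one iteration of A's loop; state = best_hotel (min_cost is best_hotel's second component, None = inf)
def pvStepA (bt : String) (people mpr : Int)
    (best : Option (Int × Int × String)) (h : Int × Int × Int × Int × String) :
    Option (Int × Int × String) :=
  let bs := h.1; let cap := h.2.1; let rooms := h.2.2.1; let cost := h.2.2.2.1; let name := h.2.2.2.2
  if pvGuardA bt bs then
    let rn := PySem.Int.floordiv (people + min mpr cap - 1) (min mpr cap)
    if rn ≤ rooms then
      let tc := rn * cost
      match best with
      | none => some (bs, tc, name)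
      | some b =>
          if tc < b.2.1 || (tc == b.2.1 && bs > b.1) then some (bs, tc, name) else some b
    else best
  else best

def find_cheapest_hotel (hotels : List (Int × Int × Int × Int × String)) (team : String × Int × Int) : String :=
  match hotels.foldl (pvStepA team.1 team.2.1 team.2.2) none with
  | none => "no-hotel"
  | some b => PySem.Int.toStr b.2.1 ++ " " ++ b.2.2

-- ===== PORT B =====
-- B's bed-type range table: ranges.get(bed_type) (distinct literal keys, so the if-chain is exact)
def pvRangeB (bt : String) : Option (Int × Int) :=
  if bt == "A" then some (20, 35)
  else if bt == "B" then some (36, 48)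
  else if bt == "C" then some (49, 62)
  else none

-- candidate for one hotel given the looked-up range: some (total_cost, bed_size, name) iff it qualifies
def pvCandB (lo hi people mpr : Int) (h : Int × Int × Int × Int × String) :
    Option (Int × Int × String) :=
  let bs := h.1; let cap := h.2.1; let rooms := h.2.2.1; let cost := h.2.2.2.1; let name := h.2.2.2.2
  if decide (lo ≤ bs) && decide (bs ≤ hi) then
    let per := min mpr cap
    let rn := PySem.Int.floordiv (people + per - 1) per
    if rn ≤ rooms then some (rn * cost, bs, name) else none
  else none

-- the tail of B: empty-check, M = min of costs, keep-first max by bed among the cost-M candidates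
def pvSelectB : List (Int × Int × String) → String
  | [] => "no-hotel"
  | c :: cs =>
      let cands := c :: cs
      let M := (PySem.List.min? (cands.map (fun x => x.1)) (fun x => x)).getD 0
      let best := (PySem.List.max? (cands.filter (fun x => x.1 == M)) (fun x => x.2.1)).getD c
      PySem.Int.toStr M ++ " " ++ best.2.2

def find_cheapest_hotel_alt (hotels : List (Int × Int × Int × Int × String)) (team : String × Int × Int) : String :=
  match pvRangeB team.1 with
  | none => "no-hotel"
  | some lh => pvSelectB (hotels.filterMap (pvCandB lh.1 lh.2 team.2.1 team.2.2))

-- ===== PRECONDITION & SPEC =====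
-- Pre_ excludes inputs where some hotel passing the bed-type guard has min(max_per_room, capacity) == 0:
-- there A raises ZeroDivisionError.
def Pre_find_cheapest_hotel (hotels : List (Int × Int × Int × Int × String)) (team : String × Int × Int) : Prop :=
  ∀ h ∈ hotels,
    ((team.1 == "A" && (decide (20 ≤ h.1) && decide (h.1 ≤ 35))) ||
     (team.1 == "B" && (decide (36 ≤ h.1) && decide (h.1 ≤ 48))) ||
     (team.1 == "C" && (decide (49 ≤ h.1) && decide (h.1 ≤ 62)))) = true →
    min team.2.2 h.2.1 ≠ 0
instance (hotels : List (Int × Int × Int × Int × String)) (team : String × Int × Int) : Decidable (Pre_find_cheapest_hotel hotels team) := by unfold Pre_find_cheapest_hotel; infer_instance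

def pvWitness_find_cheapest_hotel : (List (Int × Int × Int × Int × String)) × (String × Int × Int) :=
  ([(25, 2, 3, 100, "h1"), (40, 2, 3, 50, "h2")], ("A", 4, 2))

def Spec_find_cheapest_hotel (hotels : List (Int × Int × Int × Int × String)) (team : String × Int × Int) (out : String) : Prop := out = find_cheapest_hotel_alt hotels team
instance (hotels : List (Int × Int × Int × Int × String)) (team : String × Int × Int) (out : String) : Decidable (Spec_find_cheapest_hotel hotels team out) := by unfold Spec_find_cheapest_hotel; infer_instance

-- ===== CLAIM (what is proved, stated in full; the proofs are below) =====
def Claim_equal_find_cheapest_hotel : Prop := ∀ (hotels : List (Int × Int × Int × Int × String)) (team : String × Int × Int), Dom_find_cheapest_hotel hotels team → Pre_find_cheapest_hotel hotels team → Spec_find_cheapest_hotel hotels team (find_cheapest_hotel hotels team)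

-- ===== LEMMAS AND PROOFS =====
-- A's candidate for one hotel, in B's tuple order (total_cost, bed_size, name)
def pvCandA (bt : String) (people mpr : Int) (h : Int × Int × Int × Int × String) :
    Option (Int × Int × String) :=
  if pvGuardA bt h.1 then
    let per := min mpr h.2.1
    let rn := PySem.Int.floordiv (people + per - 1) per
    if rn ≤ h.2.2.1 then some (rn * h.2.2.2.1, h.1, h.2.2.2.2) else none
  else none

-- A's keep-first minimum on the lex key (total_cost, -bed_size)
def pvMinB (b c : Int × Int × String) : Int × Int × String :=
  if c.1 < b.1 || (c.1 == b.1 && b.2.1 < c.2.1) then c else b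

-- running minimum of total costs / keep-first maximum by bed size
def pvFMin (m : Int) (cs : List (Int × Int × String)) : Int :=
  cs.foldl (fun m x => if x.1 < m then x.1 else m) m
def pvGMax (b : Int × Int × String) (cs : List (Int × Int × String)) : Int × Int × String :=
  cs.foldl (fun b x => if b.2.1 < x.2.1 then x else b) b

-- swap between A's (bed_size, total_cost, name) and candidate order (total_cost, bed_size, name)
def pvSw (x : Int × Int × String) : Int × Int × String := (x.2.1, x.1, x.2.2)

theorem pvSw_pvSw (x : Int × Int × String) : pvSw (pvSw x) = x := rfl

theorem stepA_of_cand_none (bt : String) (people mpr : Int) (h : Int × Int × Int × Int × String)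
    (hc : pvCandA bt people mpr h = none) (best : Option (Int × Int × String)) :
    pvStepA bt people mpr best h = best := by
  unfold pvCandA at hc
  unfold pvStepA
  simp only at hc ⊢
  split_ifs at hc ⊢ with h1 h2 <;> simp_all

theorem stepA_of_cand_some (bt : String) (people mpr : Int) (h : Int × Int × Int × Int × String)
    (c : Int × Int × String) (hc : pvCandA bt people mpr h = some c) :
    pvStepA bt people mpr none h = some (pvSw c) ∧
    ∀ b, pvStepA bt people mpr (some b) h = some (pvSw (pvMinB (pvSw b) c)) := by
  unfold pvCandA at hc
  unfold pvStepA
  simp only at hc ⊢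
  split_ifs at hc ⊢ with h1 h2
  · cases hc
    refine ⟨rfl, fun b => ?_⟩
    unfold pvMinB pvSw
    simp only
    simp only [gt_iff_lt]
    split_ifs <;> rfl

theorem foldA_some (bt : String) (people mpr : Int) :
    ∀ (hs : List (Int × Int × Int × Int × String)) (b : Int × Int × String),
    hs.foldl (pvStepA bt people mpr) (some b) =
      some (pvSw ((hs.filterMap (pvCandA bt people mpr)).foldl pvMinB (pvSw b))) := by
  intro hs
  induction hs with
  | nil => intro b; simp [pvSw_pvSw]
  | cons h t ih =>
      intro b
      cases hc : pvCandA bt people mpr h with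
      | none =>
          simp only [List.foldl_cons, List.filterMap_cons, hc,
            stepA_of_cand_none bt people mpr h hc]
          exact ih b
      | some c =>
          simp only [List.foldl_cons, List.filterMap_cons, hc,
            (stepA_of_cand_some bt people mpr h c hc).2 b]
          rw [ih, pvSw_pvSw]

theorem foldA_none (bt : String) (people mpr : Int) (hs : List (Int × Int × Int × Int × String)) :
    hs.foldl (pvStepA bt people mpr) none =
      (match hs.filterMap (pvCandA bt people mpr) with
       | [] => none
       | c :: cs => some (pvSw (cs.foldl pvMinB c))) := by
  induction hs with
  | nil => rfl
  | cons h t ih =>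
      cases hc : pvCandA bt people mpr h with
      | none =>
          simp only [List.foldl_cons, List.filterMap_cons, hc,
            stepA_of_cand_none bt people mpr h hc]
          exact ih
      | some c =>
          simp only [List.foldl_cons, List.filterMap_cons, hc,
            (stepA_of_cand_some bt people mpr h c hc).1]
          rw [foldA_some bt people mpr t (pvSw c), pvSw_pvSw]

-- A's guard equals B's range-table form
theorem guard_eq_range (bt : String) (bs : Int) :
    pvGuardA bt bs =
      (match pvRangeB bt with
       | some lh => decide (lh.1 ≤ bs) && decide (bs ≤ lh.2)
       | none => false) := by
  unfold pvGuardA pvRangeB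
  by_cases h1 : bt = "A" <;> by_cases h2 : bt = "B" <;> by_cases h3 : bt = "C" <;>
    simp [h1, h2, h3]

theorem candA_eq_candB (bt : String) (lo hi people mpr : Int) (hlh : pvRangeB bt = some (lo, hi))
    (h : Int × Int × Int × Int × String) :
    pvCandA bt people mpr h = pvCandB lo hi people mpr h := by
  unfold pvCandA pvCandB
  rw [guard_eq_range bt h.1, hlh]

theorem candA_none_of_range_none (bt : String) (people mpr : Int) (hlh : pvRangeB bt = none)
    (h : Int × Int × Int × Int × String) :
    pvCandA bt people mpr h = none := by
  unfold pvCandA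
  rw [guard_eq_range bt h.1, hlh]
  rfl

-- cost of A's running best = running minimum of costs
theorem pvMinB_fst (b c : Int × Int × String) :
    (pvMinB b c).1 = if c.1 < b.1 then c.1 else b.1 := by
  unfold pvMinB
  split_ifs with h1 h2 h2 <;>
    simp only [Bool.or_eq_true, Bool.and_eq_true, decide_eq_true_eq, beq_iff_eq,
      not_or, not_and, not_lt] at h1 <;> omega

theorem fold_fst_eq_fmin : ∀ (cs : List (Int × Int × String)) (c : Int × Int × String),
    (cs.foldl pvMinB c).1 = pvFMin c.1 cs := by
  intro cs
  induction cs with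
  | nil => intro c; rfl
  | cons d t ih =>
      intro c
      rw [List.foldl_cons, ih (pvMinB c d), pvMinB_fst]
      rfl

theorem pvFMin_le (cs : List (Int × Int × String)) : ∀ m : Int, pvFMin m cs ≤ m := by
  induction cs with
  | nil => intro m; exact le_refl m
  | cons d t ih =>
      intro m
      have := ih (if d.1 < m then d.1 else m)
      unfold pvFMin at this ⊢
      simp only [List.foldl_cons]
      split_ifs at this ⊢ with h
      · omega
      · exact this

-- the minimum of the costs is attained
theorem fmin_attained : ∀ (t : List (Int × Int × String)) (a : Int),
    pvFMin a t = a ∨ ∃ x ∈ t, x.1 = pvFMin a t := by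
  intro t
  induction t with
  | nil => intro a; exact Or.inl rfl
  | cons d s ih =>
      intro a
      have hcons : pvFMin a (d :: s) = pvFMin (if d.1 < a then d.1 else a) s := rfl
      rcases ih (if d.1 < a then d.1 else a) with h | ⟨x, hx, hxe⟩
      · by_cases hd : d.1 < a
        · exact Or.inr ⟨d, by simp, by rw [hcons, h, if_pos hd]⟩
        · exact Or.inl (by rw [hcons, h, if_neg hd])
      · exact Or.inr ⟨x, List.mem_cons_of_mem _ hx, by rw [hcons]; exact hxe⟩

theorem filter_fmin_ne_nil (c : Int × Int × String) (t : List (Int × Int × String)) :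
    (c :: t).filter (fun x => x.1 == pvFMin c.1 t) ≠ [] := by
  rcases fmin_attained t c.1 with h | ⟨x, hx, hxe⟩
  · have hm : c ∈ (c :: t).filter (fun x => x.1 == pvFMin c.1 t) :=
      List.mem_filter.mpr ⟨by simp, by simp [h]⟩
    exact List.ne_nil_of_mem hm
  · have hm : x ∈ (c :: t).filter (fun x => x.1 == pvFMin c.1 t) :=
      List.mem_filter.mpr ⟨List.mem_cons_of_mem _ hx, by simp [hxe]⟩
    exact List.ne_nil_of_mem hm

-- the main staging lemma: A's fold = keep-first max-by-bed among the minimum-cost candidates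
theorem fold_eq_staged : ∀ (cs : List (Int × Int × String)) (c : Int × Int × String),
    cs.foldl pvMinB c =
      pvGMax (((c :: cs).filter (fun x => x.1 == pvFMin c.1 cs)).headD c)
             (((c :: cs).filter (fun x => x.1 == pvFMin c.1 cs)).tail) := by
  intro cs
  induction cs with
  | nil =>
      intro c
      simp [pvFMin, pvGMax]
  | cons d t ih =>
      intro c
      have hM : pvFMin c.1 (d :: t) = pvFMin (pvMinB c d).1 t := by
        rw [pvMinB_fst]; rfl
      have hle : pvFMin (pvMinB c d).1 t ≤ (pvMinB c d).1 := pvFMin_le t _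
      rw [List.foldl_cons, ih (pvMinB c d), hM]
      by_cases h1 : d.1 < c.1
      · -- pvMinB c d = d ; c is dropped by the filter (M ≤ d.1 < c.1)
        have he : pvMinB c d = d := by unfold pvMinB; simp [h1]
        rw [he] at hle ⊢
        rw [List.filter_cons_of_neg (a := c) (by simp only [beq_iff_eq]; omega)]
        cases hf : (d :: t).filter (fun x => x.1 == pvFMin d.1 t) with
        | nil => exact absurd hf (filter_fmin_ne_nil d t)
        | cons w t' => rfl
      · by_cases h2 : d.1 = c.1
        · -- equal costs: pvMinB c d keeps the better bed, the same as the max-by-bed step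
          have he : pvMinB c d = if c.2.1 < d.2.1 then d else c := by
            unfold pvMinB; simp [h2]
          have he1 : (pvMinB c d).1 = c.1 := by rw [pvMinB_fst, if_neg h1]
          rw [he1] at hle ⊢
          by_cases h3 : c.1 = pvFMin c.1 t
          · rw [List.filter_cons_of_pos (a := c) (by simp only [beq_iff_eq]; omega)]
            rw [List.filter_cons_of_pos (a := d) (by simp only [beq_iff_eq]; omega)]
            rw [List.filter_cons_of_pos (a := pvMinB c d)
              (by simp only [beq_iff_eq, he1]; omega)]
            simp only [List.headD_cons, List.tail_cons]
            unfold pvGMax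
            rw [List.foldl_cons, he]
          · rw [List.filter_cons_of_neg (a := c) (by simp only [beq_iff_eq]; omega)]
            rw [List.filter_cons_of_neg (a := d) (by simp only [beq_iff_eq]; omega)]
            rw [List.filter_cons_of_neg (a := pvMinB c d)
              (by simp only [beq_iff_eq, he1]; omega)]
            rcases fmin_attained t c.1 with heq | ⟨x, hx, hxe⟩
            · exact absurd heq.symm h3
            · have hne : t.filter (fun x => x.1 == pvFMin c.1 t) ≠ [] :=
                List.ne_nil_of_mem (List.mem_filter.mpr ⟨hx, by simp [hxe]⟩)
              cases hf : t.filter (fun x => x.1 == pvFMin c.1 t) with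
              | nil => exact absurd hf hne
              | cons w t' => rfl
        · -- c.1 < d.1 : pvMinB c d = c ; d is dropped by the filter
          have he : pvMinB c d = c := by unfold pvMinB; simp [h1, h2]
          rw [he] at hle ⊢
          have hfilter : (c :: d :: t).filter (fun x => x.1 == pvFMin c.1 t)
              = (c :: t).filter (fun x => x.1 == pvFMin c.1 t) := by
            by_cases hc : (fun x : Int × Int × String => x.1 == pvFMin c.1 t) c = true
            · rw [List.filter_cons_of_pos (a := c) hc,
                List.filter_cons_of_neg (a := d) (by simp only [beq_iff_eq]; omega),
                List.filter_cons_of_pos (a := c) hc]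
            · rw [List.filter_cons_of_neg (a := c) hc,
                List.filter_cons_of_neg (a := d) (by simp only [beq_iff_eq]; omega),
                List.filter_cons_of_neg (a := c) hc]
          rw [hfilter]

-- bridge to B's min? : the running minimum fold
theorem min_go : ∀ (t : List Int) (a : Int),
    PySem.List.min? (a :: t) (fun x => x) =
      some (t.foldl (fun m y => if y < m then y else m) a) := by
  intro t
  induction t with
  | nil => intro a; rfl
  | cons b s ih =>
      intro a
      have h1 : PySem.List.min? (a :: b :: s) (fun x : Int => x)
          = PySem.List.min? ((if b < a then b else a) :: s) (fun x : Int => x) := by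
        by_cases h : b < a <;> simp [PySem.List.min?, h]
      rw [h1, ih]
      rfl

theorem min?_getD_eq_fmin (c : Int × Int × String) (cs : List (Int × Int × String)) :
    (PySem.List.min? ((c :: cs).map (fun x => x.1)) (fun x => x)).getD 0 = pvFMin c.1 cs := by
  rw [List.map_cons, min_go, Option.getD_some]
  unfold pvFMin
  rw [List.foldl_map]

-- bridge to B's max? : the keep-first maximum by bed size
theorem max_go : ∀ (t : List (Int × Int × String)) (w : Int × Int × String),
    PySem.List.max? (w :: t) (fun x => x.2.1) = some (pvGMax w t) := by
  intro t
  induction t with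
  | nil => intro w; rfl
  | cons a s ih =>
      intro w
      have h1 : PySem.List.max? (w :: a :: s) (fun x => x.2.1)
          = PySem.List.max? ((if w.2.1 < a.2.1 then a else w) :: s) (fun x => x.2.1) := by
        by_cases h : w.2.1 < a.2.1 <;> simp [PySem.List.max?, h]
      rw [h1, ih]
      have h2 : pvGMax w (a :: s) = pvGMax (if w.2.1 < a.2.1 then a else w) s := by
        unfold pvGMax; rw [List.foldl_cons]
      rw [h2]

theorem max?_getD_eq_gmax (l : List (Int × Int × String)) (d : Int × Int × String) :
    (PySem.List.max? l (fun x => x.2.1)).getD d = pvGMax (l.headD d) l.tail := by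
  cases l with
  | nil => rfl
  | cons w t => rw [max_go, Option.getD_some, List.headD_cons, List.tail_cons]

-- ===== VERDICT (by name: the statement is the Claim_ definition above) =====
theorem find_cheapest_hotel_spec : Claim_equal_find_cheapest_hotel := by
  intro hotels team _ _
  unfold Spec_find_cheapest_hotel find_cheapest_hotel find_cheapest_hotel_alt
  rw [foldA_none]
  cases hlh : pvRangeB team.1 with
  | none =>
      have : hotels.filterMap (pvCandA team.1 team.2.1 team.2.2) = [] := by
        simp only [List.filterMap_eq_nil_iff]
        intro h _
        exact candA_none_of_range_none team.1 team.2.1 team.2.2 hlh h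
      rw [this]
  | some lh =>
      have hfm : hotels.filterMap (pvCandA team.1 team.2.1 team.2.2) =
          hotels.filterMap (pvCandB lh.1 lh.2 team.2.1 team.2.2) :=
        List.filterMap_congr (fun h _ => candA_eq_candB team.1 lh.1 lh.2 team.2.1 team.2.2
          (by rw [hlh]) h)
      show _ = pvSelectB (hotels.filterMap (pvCandB lh.1 lh.2 team.2.1 team.2.2))
      rw [hfm]
      cases hc : hotels.filterMap (pvCandB lh.1 lh.2 team.2.1 team.2.2) with
      | nil => rfl
      | cons c cs =>
          simp only [pvSelectB, pvSw, min?_getD_eq_fmin c cs, max?_getD_eq_gmax]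
          rw [fold_fst_eq_fmin cs c, fold_eq_staged cs c]
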